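-- pv_equiv track=rewrite | github.com/orenmn/memViewer | genUtils.py | textWidgsStrsDiffsGenerator
-- ===== SOURCE A (Python) =====
-- import collections
--
-- TextWidgsStrsDiff = collections.namedtuple(
--     'TextWidgsStrsDiff', ('char1', 'char2', 'charPositionStr'))
--
-- Position = collections.namedtuple(
--     'Position', ('y', 'x'))
--
-- def textWidgsStrsDiffsGenerator(textWidgStr1, textWidgStr2):
--     currYPosition = 1
--     currXPosition = 0
--     for char1, char2 in zip(textWidgStr1, textWidgStr2):
--         if '\n' == char1:
--             currYPosition += 1
--             currXPosition = 0
--         else: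
--             if char1 != char2:
--                 yield TextWidgsStrsDiff(
--                     char1, char2,
--                     positionToTkinterPositionStr(
--                         Position(currYPosition, currXPosition)))
--             currXPosition += 1
--
-- def positionToTkinterPositionStr(position):
--     return '{}.{}'.format(*position)
-- ===== SOURCE B (Python) =====
-- import collections
--
-- TextWidgsStrsDiff = collections.namedtuple(
--     'TextWidgsStrsDiff', ('char1', 'char2', 'charPositionStr'))
--
--
-- def textWidgsStrsDiffsGenerator(textWidgStr1, textWidgStr2):
--     # pass 1: a positions table, index i -> (y, x) of char i of str1, None for '\n'
--     positions = []
--     y, x = 1, 0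
--     for ch in textWidgStr1:
--         if ch == '\n':
--             positions.append(None)
--             y += 1
--             x = 0
--         else:
--             positions.append((y, x))
--             x += 1
--     # pass 2: emit diffs from the zipped table (zip truncates like A's zip)
--     for c1, c2, pos in zip(textWidgStr1, textWidgStr2, positions):
--         if pos is not None and c1 != c2:
--             yield TextWidgsStrsDiff(c1, c2, '{}.{}'.format(*pos))
-- ===== Notes on version B (the rewrite author's own statement) =====
-- stated objective: alternative
-- what changed: Splits A's single stateful scan into two passes: one pass precomputes a positions table (y,x per character of str1, None for newlines), then a separate stateless pass over zip(str1, str2, positions) emits the diffs.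
import Mathlib
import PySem

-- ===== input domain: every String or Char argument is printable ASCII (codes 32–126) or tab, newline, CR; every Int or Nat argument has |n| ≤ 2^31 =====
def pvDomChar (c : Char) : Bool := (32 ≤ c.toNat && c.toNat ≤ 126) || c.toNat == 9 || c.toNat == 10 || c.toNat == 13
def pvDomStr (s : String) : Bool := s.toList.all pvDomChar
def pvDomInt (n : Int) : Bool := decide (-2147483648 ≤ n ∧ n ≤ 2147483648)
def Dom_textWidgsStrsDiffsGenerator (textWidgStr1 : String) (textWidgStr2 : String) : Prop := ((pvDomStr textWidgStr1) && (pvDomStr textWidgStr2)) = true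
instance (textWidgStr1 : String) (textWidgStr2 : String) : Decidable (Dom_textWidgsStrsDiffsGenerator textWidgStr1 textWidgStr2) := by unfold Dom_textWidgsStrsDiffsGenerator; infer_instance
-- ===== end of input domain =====

-- B replaces A's single stateful scan with two passes (a precomputed positions
-- table, then a stateless emitting pass over the zipped table); objective: alternative.

-- '{}.{}'.format(y, x) — shared by both Pythons (A via positionToTkinterPositionStr)
def pvPosStr (y x : Int) : String := PySem.Int.toStr y ++ "." ++ PySem.Int.toStr x

-- ===== PORT A =====
-- A's loop over zip(str1, str2) carrying (currYPosition, currXPosition)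
def pvLoopA : List (Char × Char) → Int → Int → List (String × String × String)
  | [], _, _ => []
  | (c1, c2) :: rest, y, x =>
    if c1 = '\n' then
      pvLoopA rest (y + 1) 0
    else
      (if c1 ≠ c2 then [(String.mk [c1], String.mk [c2], pvPosStr y x)] else [])
        ++ pvLoopA rest y (x + 1)

def textWidgsStrsDiffsGenerator (textWidgStr1 : String) (textWidgStr2 : String) : List (String × String × String) :=
  pvLoopA (textWidgStr1.toList.zip textWidgStr2.toList) 1 0

-- ===== PORT B =====
-- pass 1: positions table (none for '\n')
def pvPositions : List Char → Int → Int → List (Option (Int × Int))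
  | [], _, _ => []
  | c :: rest, y, x =>
    if c = '\n' then none :: pvPositions rest (y + 1) 0
    else some (y, x) :: pvPositions rest y (x + 1)

-- zip(str1, str2, positions): truncating 3-way zip
def pvZip3 : List Char → List Char → List (Option (Int × Int)) → List (Char × Char × Option (Int × Int))
  | c1 :: r1, c2 :: r2, p :: rp => (c1, c2, p) :: pvZip3 r1 r2 rp
  | _, _, _ => []

-- pass 2: stateless emission from the zipped table
def pvEmit : List (Char × Char × Option (Int × Int)) → List (String × String × String)
  | [] => []
  | (c1, c2, pos) :: rest =>
    (match pos with
     | some (y, x) => if c1 ≠ c2 then [(String.mk [c1], String.mk [c2], pvPosStr y x)] else []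
     | none => []) ++ pvEmit rest

def textWidgsStrsDiffsGenerator_alt (textWidgStr1 : String) (textWidgStr2 : String) : List (String × String × String) :=
  pvEmit (pvZip3 textWidgStr1.toList textWidgStr2.toList (pvPositions textWidgStr1.toList 1 0))

-- ===== PRECONDITION & SPEC =====
def Spec_textWidgsStrsDiffsGenerator (textWidgStr1 : String) (textWidgStr2 : String) (out : List (String × String × String)) : Prop := out = textWidgsStrsDiffsGenerator_alt textWidgStr1 textWidgStr2
instance (textWidgStr1 : String) (textWidgStr2 : String) (out : List (String × String × String)) : Decidable (Spec_textWidgsStrsDiffsGenerator textWidgStr1 textWidgStr2 out) := by unfold Spec_textWidgsStrsDiffsGenerator; infer_instance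

-- ===== CLAIM (what is proved, stated in full; the proofs are below) =====
def Claim_equal_textWidgsStrsDiffsGenerator : Prop := ∀ (textWidgStr1 : String) (textWidgStr2 : String), Dom_textWidgsStrsDiffsGenerator textWidgStr1 textWidgStr2 → Spec_textWidgsStrsDiffsGenerator textWidgStr1 textWidgStr2 (textWidgsStrsDiffsGenerator textWidgStr1 textWidgStr2)

-- ===== LEMMAS AND PROOFS =====
theorem pvEmit_zip3_positions (l1 l2 : List Char) :
    ∀ (y x : Int), pvEmit (pvZip3 l1 l2 (pvPositions l1 y x)) = pvLoopA (l1.zip l2) y x := by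
  induction l1 generalizing l2 with
  | nil => intro y x; cases l2 <;> simp [pvPositions, pvZip3, pvEmit, pvLoopA]
  | cons c1 r1 ih =>
    intro y x
    cases l2 with
    | nil => by_cases h : c1 = '\n' <;> simp [pvPositions, pvZip3, pvEmit, pvLoopA, h]
    | cons c2 r2 =>
      by_cases h : c1 = '\n' <;>
        simp [pvPositions, pvZip3, pvEmit, pvLoopA, h, ih]

-- ===== VERDICT (by name: the statement is the Claim_ definition above) =====
theorem textWidgsStrsDiffsGenerator_spec : Claim_equal_textWidgsStrsDiffsGenerator := by
  intro s1 s2 _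
  unfold Spec_textWidgsStrsDiffsGenerator textWidgsStrsDiffsGenerator textWidgsStrsDiffsGenerator_alt
  exact (pvEmit_zip3_positions _ _ 1 0).symm
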